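-- pv_equiv track=rewrite | github.com/sidou06/hackerrank-solutions | Algorithms/Implementations/Larry's Array/Solution.py | larrysArray
-- ===== SOURCE A (Python) =====
-- def larrysArray(A):
--     # Initialize the inversion count
--     inv = 0
--
--     # Count the number of inversions in the array
--     for i in range(len(A) - 1):
--         for j in range(i + 1, len(A)):
--             if A[i] > A[j]:
--                 inv += 1  # Increment inversion count when A[i] > A[j]
--
--     # If the number of inversions is even, the array can be sorted
--     if inv % 2 == 0:
--         return "YES"  # Array can be sorted by rotation
--     return "NO"  # Array cannot be sorted by rotation
-- ===== SOURCE B (Python) =====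
-- def larrysArray(A):
--     # Merge-sort inversion counting: O(n log n) instead of A's O(n^2) double loop.
--     def sort_count(xs):
--         if len(xs) < 2:
--             return xs, 0
--         mid = len(xs) // 2
--         left, a = sort_count(xs[:mid])
--         right, b = sort_count(xs[mid:])
--         merged = []
--         inv = a + b
--         i = j = 0
--         while i < len(left) and j < len(right):
--             if left[i] <= right[j]:
--                 merged.append(left[i]); i += 1
--             else:
--                 merged.append(right[j]); j += 1; inv += len(left) - i
--         merged.extend(left[i:])
--         merged.extend(right[j:])
--         return merged, inv
--     _, inv = sort_count(A)
--     return "YES" if inv % 2 == 0 else "NO"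
-- ===== Notes on version B (the rewrite author's own statement) =====
-- stated objective: faster
-- what changed: Replaces the O(n^2) nested index loops that count inversions with a divide-and-conquer merge sort that counts inversions during the merge step (only the parity is used).
import Mathlib
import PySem

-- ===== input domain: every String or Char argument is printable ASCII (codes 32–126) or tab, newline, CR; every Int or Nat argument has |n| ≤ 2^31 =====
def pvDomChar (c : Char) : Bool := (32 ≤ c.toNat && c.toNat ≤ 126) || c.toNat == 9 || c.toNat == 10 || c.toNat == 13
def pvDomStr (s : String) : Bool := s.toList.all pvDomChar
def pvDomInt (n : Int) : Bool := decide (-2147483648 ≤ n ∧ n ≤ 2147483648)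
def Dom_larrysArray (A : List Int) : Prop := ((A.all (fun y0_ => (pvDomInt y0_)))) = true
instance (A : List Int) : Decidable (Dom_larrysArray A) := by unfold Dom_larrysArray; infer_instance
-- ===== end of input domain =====

-- B replaces A's O(n^2) nested inversion-count loops by merge sort counting inversions during merges (asymptotically faster).

-- ===== PORT A =====
def larrysArray (A : List Int) : String :=
  let inv : Int :=
    (PySem.List.pyRange 0 (PySem.List.len A - 1)).foldl (fun inv i =>
      (PySem.List.pyRange (i + 1) (PySem.List.len A)).foldl (fun inv j =>
        if PySem.List.pyGetD A j 0 < PySem.List.pyGetD A i 0 then inv + 1 else inv) inv) 0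
  if PySem.Int.mod inv 2 = 0 then "YES" else "NO"

-- ===== PORT B =====
-- merge step of Source B's sort_count: merges two runs, counting left-remainder for each element taken from the right
def mergeCnt : List Int → List Int → List Int × Nat
  | [], r => (r, 0)
  | a :: l, [] => (a :: l, 0)
  | a :: l, b :: r =>
    if a ≤ b then
      let p := mergeCnt l (b :: r)
      (a :: p.1, p.2)
    else
      let p := mergeCnt (a :: l) r
      (b :: p.1, p.2 + (a :: l).length)
termination_by l r => l.length + r.length

-- sort_count of Source B: sorted list together with the inversion count
def msortCnt (xs : List Int) : List Int × Nat :=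
  if xs.length < 2 then (xs, 0)
  else
    let mid := xs.length / 2
    let pl := msortCnt (xs.take mid)
    let pr := msortCnt (xs.drop mid)
    let pm := mergeCnt pl.1 pr.1
    (pm.1, pl.2 + pr.2 + pm.2)
termination_by xs.length
decreasing_by
  · simp only [List.length_take]; omega
  · simp only [List.length_drop]; omega

def larrysArray_alt (A : List Int) : String :=
  if (msortCnt A).2 % 2 = 0 then "YES" else "NO"

-- ===== PRECONDITION & SPEC =====
def Spec_larrysArray (A : List Int) (out : String) : Prop := out = larrysArray_alt A
instance (A : List Int) (out : String) : Decidable (Spec_larrysArray A out) := by unfold Spec_larrysArray; infer_instance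

-- ===== CLAIM (what is proved, stated in full; the proofs are below) =====
def Claim_equal_larrysArray : Prop := ∀ (A : List Int), Dom_larrysArray A → Spec_larrysArray A (larrysArray A)

-- ===== LEMMAS AND PROOFS =====

-- number of inversions (pairs i < j with xs[i] > xs[j]) of a list, head-first decomposition
def invCount : List Int → Nat
  | [] => 0
  | a :: l => l.countP (fun b => decide (b < a)) + invCount l

-- cross inversions between a left and a right part, decomposed along the right part
def crossCnt : List Int → List Int → Nat
  | _, [] => 0
  | l, y :: r => l.countP (fun x => decide (y < x)) + crossCnt l r

lemma crossCnt_nil_left (r : List Int) : crossCnt [] r = 0 := by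
  induction r with
  | nil => rfl
  | cons y r ih => simp [crossCnt, ih]

lemma crossCnt_cons_left (a : Int) (l r : List Int) :
    crossCnt (a :: l) r = r.countP (fun y => decide (y < a)) + crossCnt l r := by
  induction r with
  | nil => rfl
  | cons y r ih => simp [crossCnt, ih, List.countP_cons]; omega

lemma crossCnt_perm_left {l l' : List Int} (h : l.Perm l') (r : List Int) :
    crossCnt l r = crossCnt l' r := by
  induction r with
  | nil => rfl
  | cons y r ih => simp [crossCnt, ih, h.countP_eq]

lemma crossCnt_perm_right (l : List Int) {r r' : List Int} (h : r.Perm r') :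
    crossCnt l r = crossCnt l r' := by
  induction h with
  | nil => rfl
  | cons x _ ih => simp [crossCnt, ih]
  | swap x y r => simp [crossCnt]; omega
  | trans _ _ ih1 ih2 => omega

lemma invCount_append (l r : List Int) :
    invCount (l ++ r) = invCount l + invCount r + crossCnt l r := by
  induction l with
  | nil => simp [invCount, crossCnt_nil_left]
  | cons a l ih =>
      simp [invCount, List.countP_append, ih, crossCnt_cons_left]
      omega

lemma mergeCnt_perm (l r : List Int) : (mergeCnt l r).1.Perm (l ++ r) := by
  induction l, r using mergeCnt.induct with
  | case1 r => simp [mergeCnt]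
  | case2 a l => simp [mergeCnt]
  | case3 a l b r hab ih =>
      simp only [mergeCnt, if_pos hab]
      exact ih.cons a
  | case4 a l b r hab ih =>
      simp only [mergeCnt, if_neg hab]
      exact (ih.cons b).trans List.perm_middle.symm

lemma mergeCnt_sorted {l r : List Int} (hl : l.Pairwise (· ≤ ·)) (hr : r.Pairwise (· ≤ ·)) :
    (mergeCnt l r).1.Pairwise (· ≤ ·) := by
  induction l, r using mergeCnt.induct with
  | case1 r => simpa [mergeCnt] using hr
  | case2 a l => simpa [mergeCnt] using hl
  | case3 a l b r hab ih =>
      simp only [mergeCnt, if_pos hab]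
      rw [List.pairwise_cons] at hl hr ⊢
      refine ⟨?_, ih hl.2 (List.pairwise_cons.2 hr)⟩
      intro x hx
      have hx' := (mergeCnt_perm l (b :: r)).mem_iff.1 hx
      rcases List.mem_append.1 hx' with h | h
      · exact hl.1 x h
      · rcases List.mem_cons.1 h with h | h
        · omega
        · exact le_trans hab (hr.1 x h)
  | case4 a l b r hab ih =>
      simp only [mergeCnt, if_neg hab]
      rw [List.pairwise_cons] at hl hr ⊢
      refine ⟨?_, ih (List.pairwise_cons.2 hl) hr.2⟩
      intro x hx
      have hx' := (mergeCnt_perm (a :: l) r).mem_iff.1 hx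
      rcases List.mem_append.1 hx' with h | h
      · rcases List.mem_cons.1 h with h | h
        · omega
        · have := hl.1 x h; omega
      · exact hr.1 x h

lemma mergeCnt_cnt {l r : List Int} (hl : l.Pairwise (· ≤ ·)) (hr : r.Pairwise (· ≤ ·)) :
    (mergeCnt l r).2 = crossCnt l r := by
  induction l, r using mergeCnt.induct with
  | case1 r => simp [mergeCnt, crossCnt_nil_left]
  | case2 a l => simp [mergeCnt, crossCnt]
  | case3 a l b r hab ih =>
      rw [List.pairwise_cons] at hl hr
      simp only [mergeCnt, if_pos hab]
      rw [ih hl.2 (List.pairwise_cons.2 hr), crossCnt_cons_left]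
      have h0 : (b :: r).countP (fun y => decide (y < a)) = 0 := by
        rw [List.countP_eq_zero]
        intro y hy
        rcases List.mem_cons.1 hy with h | h
        · subst h; simp; omega
        · have := hr.1 y h; simp; omega
      omega
  | case4 a l b r hab ih =>
      rw [List.pairwise_cons] at hl hr
      simp only [mergeCnt, if_neg hab]
      rw [ih (List.pairwise_cons.2 hl) hr.2]
      have hlen : (a :: l).countP (fun x => decide (b < x)) = (a :: l).length := by
        rw [List.countP_eq_length]
        intro x hx
        rcases List.mem_cons.1 hx with h | h
        · subst h; simp; omega
        · have := hl.1 x h; simp; omega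
      simp only [crossCnt]
      omega

lemma msortCnt_main (xs : List Int) :
    (msortCnt xs).1.Perm xs ∧ (msortCnt xs).1.Pairwise (· ≤ ·) ∧ (msortCnt xs).2 = invCount xs := by
  induction xs using msortCnt.induct with
  | case1 xs h =>
      rw [msortCnt, if_pos h]
      match xs, h with
      | [], _ => simp [invCount]
      | [a], _ => simp [invCount]
  | case2 xs h mid ihl ihr =>
      rw [show mid = xs.length / 2 from rfl] at ihl ihr
      rw [msortCnt, if_neg h]
      obtain ⟨pleq, plso, plc⟩ := ihl
      obtain ⟨preq, prso, prc⟩ := ihr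
      simp only
      have htd : (xs.take (xs.length / 2) ++ xs.drop (xs.length / 2)).Perm xs := by
        rw [List.take_append_drop]
      refine ⟨((mergeCnt_perm _ _).trans ((pleq.append preq).trans htd)), mergeCnt_sorted plso prso, ?_⟩
      have hcnt : (mergeCnt (msortCnt (xs.take (xs.length / 2))).1 (msortCnt (xs.drop (xs.length / 2))).1).2
          = crossCnt (xs.take (xs.length / 2)) (xs.drop (xs.length / 2)) := by
        rw [mergeCnt_cnt plso prso, crossCnt_perm_left pleq, crossCnt_perm_right _ preq]
      have hinv : invCount xs = invCount (xs.take (xs.length / 2) ++ xs.drop (xs.length / 2)) := by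
        rw [List.take_append_drop]
      rw [hinv, invCount_append, plc, prc, hcnt]

-- A's inner loop over j counts the later elements smaller than A[i]
lemma loopA_inner (A : List Int) (i : Int) (hi : 0 ≤ i) (c : Int) :
    (PySem.List.pyRange (i + 1) (PySem.List.len A)).foldl (fun inv j =>
        if PySem.List.pyGetD A j 0 < PySem.List.pyGetD A i 0 then inv + 1 else inv) c
      = c + ((A.drop (i + 1).toNat).countP (fun b => decide (b < PySem.List.pyGetD A i 0)) : Int) := by
  rw [PySem.List.foldl_pyRange_pyGetD A 0
      (fun inv y => if y < PySem.List.pyGetD A i 0 then inv + 1 else inv) c (by omega)]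
  rw [show (fun (inv : Int) y => if y < PySem.List.pyGetD A i 0 then inv + 1 else inv)
        = (fun (inv : Int) y => if (fun b => decide (b < PySem.List.pyGetD A i 0)) y = true then inv + 1 else inv) by
      funext inv y; simp]
  exact PySem.List.foldl_count_if _ _ c

-- the per-index inversion contributions sum to invCount
lemma sum_drop_countP (A : List Int) :
    ((List.range A.length).map (fun k =>
        (A.drop (k + 1)).countP (fun b => decide (b < PySem.List.pyGetD A (k : Int) 0)))).sum
      = invCount A := by
  induction A with
  | nil => simp [invCount]
  | cons a l ih =>
      simp only [List.length_cons]
      rw [List.range_succ_eq_map]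
      simp only [List.map_cons, List.sum_cons, List.map_map]
      have hstep : ∀ k ∈ List.range l.length,
          ((fun k : Nat => ((a :: l).drop (k + 1)).countP
              (fun b => decide (b < PySem.List.pyGetD (a :: l) (k : Int) 0))) ∘ Nat.succ) k
            = (l.drop (k + 1)).countP (fun b => decide (b < PySem.List.pyGetD l (k : Int) 0)) := by
        intro k _
        have hg : PySem.List.pyGetD (a :: l) ((k : Int) + 1) 0 = PySem.List.pyGetD l (k : Int) 0 := by
          rw [show ((k : Int) + 1) = (((k + 1 : Nat)) : Int) by push_cast; ring]
          rw [PySem.List.pyGetD_natCast, PySem.List.pyGetD_natCast]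
          simp
        simp only [Function.comp_apply, Nat.succ_eq_add_one, Nat.cast_add, Nat.cast_one,
          List.drop_succ_cons, hg]
      rw [List.map_congr_left hstep, ih]
      have h0 : PySem.List.pyGetD (a :: l) ((0 : Nat) : Int) 0 = a := by
        rw [PySem.List.pyGetD_natCast]; rfl
      simp only [Nat.cast_zero] at h0
      simp [h0, invCount]

lemma loopA_eq (A : List Int) :
    (PySem.List.pyRange 0 (PySem.List.len A - 1)).foldl (fun inv i =>
      (PySem.List.pyRange (i + 1) (PySem.List.len A)).foldl (fun inv j =>
        if PySem.List.pyGetD A j 0 < PySem.List.pyGetD A i 0 then inv + 1 else inv) inv) 0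
    = (invCount A : Int) := by
  have hcong : ∀ (c : Int), ∀ i ∈ PySem.List.pyRange 0 (PySem.List.len A - 1),
      (PySem.List.pyRange (i + 1) (PySem.List.len A)).foldl (fun inv j =>
        if PySem.List.pyGetD A j 0 < PySem.List.pyGetD A i 0 then inv + 1 else inv) c
      = c + ((A.drop (i + 1).toNat).countP (fun b => decide (b < PySem.List.pyGetD A i 0)) : Int) := by
    intro c i hi
    exact loopA_inner A i (PySem.List.mem_pyRange_one.1 hi).1 c
  rw [PySem.List.foldl_congr_mem _ _
      (fun c i => c + ((A.drop (i + 1).toNat).countP (fun b => decide (b < PySem.List.pyGetD A i 0)) : Int)) 0 hcong]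
  rw [PySem.List.foldl_add]
  -- extend the outer range from len-1 to len (the extra term is zero: drop past the end is empty)
  have hext : ((PySem.List.pyRange 0 (PySem.List.len A - 1)).map
        (fun i => ((A.drop (i + 1).toNat).countP (fun b => decide (b < PySem.List.pyGetD A i 0)) : Int))).sum
      = ((PySem.List.pyRange 0 (PySem.List.len A)).map
        (fun i => ((A.drop (i + 1).toNat).countP (fun b => decide (b < PySem.List.pyGetD A i 0)) : Int))).sum := by
    rcases A with _ | ⟨a, l⟩
    · rfl
    · have hlen : (0 : Int) ≤ PySem.List.len (a :: l) - 1 := by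
        simp [PySem.List.len_eq]
      have hsplit : PySem.List.pyRange 0 (PySem.List.len (a :: l))
          = PySem.List.pyRange 0 (PySem.List.len (a :: l) - 1) ++ [PySem.List.len (a :: l) - 1] := by
        have := PySem.List.pyRange_one_succ_right (a := 0) (b := PySem.List.len (a :: l) - 1) (by omega)
        simpa using this
      rw [hsplit, List.map_append, List.sum_append]
      simp [PySem.List.len_eq]
  rw [hext, PySem.List.pyRange_one]
  rw [List.map_map]
  have hlenA : ((PySem.List.len A) - 0).toNat = A.length := by simp [PySem.List.len_eq]
  rw [hlenA]
  have hpt : ∀ k ∈ List.range A.length,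
      ((fun i => ((A.drop (i + 1).toNat).countP (fun b => decide (b < PySem.List.pyGetD A i 0)) : Int)) ∘
        (fun k : Nat => (0 : Int) + k)) k
      = ((A.drop (k + 1)).countP (fun b => decide (b < PySem.List.pyGetD A (k : Int) 0)) : Int) := by
    intro k _
    simp only [Function.comp, zero_add]
    rw [show ((k : Int) + 1).toNat = k + 1 from by omega]
  rw [List.map_congr_left hpt]
  rw [show (fun k : Nat => ((A.drop (k + 1)).countP (fun b => decide (b < PySem.List.pyGetD A (k : Int) 0)) : Int))
        = ((fun n : Nat => (n : Int)) ∘ (fun k : Nat => (A.drop (k + 1)).countP (fun b => decide (b < PySem.List.pyGetD A (k : Int) 0)))) from rfl]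
  rw [← List.map_map]
  rw [← Nat.cast_list_sum]
  rw [sum_drop_countP]
  simp
-- ===== VERDICT (by name: the statement is the Claim_ definition above) =====
theorem larrysArray_spec : Claim_equal_larrysArray := by
  intro A _
  show larrysArray A = larrysArray_alt A
  unfold larrysArray larrysArray_alt
  rw [loopA_eq A, (msortCnt_main A).2.2]
  show (if PySem.Int.mod ((invCount A : Int)) 2 = 0 then "YES" else "NO")
      = (if invCount A % 2 = 0 then "YES" else "NO")
  rw [PySem.Int.mod_eq_emod_of_pos (by omega : (0:Int) < 2)]
  by_cases h : invCount A % 2 = 0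
  · rw [if_pos (show ((invCount A : Int)) % 2 = 0 by omega), if_pos h]
  · rw [if_neg (show ¬ ((invCount A : Int)) % 2 = 0 by omega), if_neg h]
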